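-- pv_equiv track=rewrite | github.com/lambd0id/Reed-Solomon-ECC-Implementation | reed-solomon.py | syndromes
-- ===== SOURCE A (Python) =====
-- def add(a,b):
--     return (a+b)%929
--
-- def multiply(a,b):
--     return (a*b)%929
--
-- def power(a,x):
--     n = a
--     if x==0:
--         return 1
--     for i in range(x-1):
--         n = multiply(n,a)
--     return n
--
-- def syndromes(data,E,N,a_pow):
--     s = [0]*E
--
--     for i in range(E):
--         n = 0
--         for j in range(N):
--             n = add(n,multiply(data[j],power(a_pow[i+1],N-1-j)))
--         s[i] = n
--     return s
-- ===== SOURCE B (Python) =====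
-- def syndromes(data, E, N, a_pow):
--     out = []
--     for i in range(E):
--         acc = 0
--         for j in range(N):
--             acc = (acc * a_pow[i + 1] + data[j]) % 929
--         out.append(acc)
--     return out
-- ===== Notes on version B (the rewrite author's own statement) =====
-- stated objective: faster
-- what changed: B evaluates each syndrome by Horner's rule in one pass over the data instead of recomputing power(a_pow[i+1], N-1-j) by a fresh O(N) multiplication loop for every term.
import Mathlib
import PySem

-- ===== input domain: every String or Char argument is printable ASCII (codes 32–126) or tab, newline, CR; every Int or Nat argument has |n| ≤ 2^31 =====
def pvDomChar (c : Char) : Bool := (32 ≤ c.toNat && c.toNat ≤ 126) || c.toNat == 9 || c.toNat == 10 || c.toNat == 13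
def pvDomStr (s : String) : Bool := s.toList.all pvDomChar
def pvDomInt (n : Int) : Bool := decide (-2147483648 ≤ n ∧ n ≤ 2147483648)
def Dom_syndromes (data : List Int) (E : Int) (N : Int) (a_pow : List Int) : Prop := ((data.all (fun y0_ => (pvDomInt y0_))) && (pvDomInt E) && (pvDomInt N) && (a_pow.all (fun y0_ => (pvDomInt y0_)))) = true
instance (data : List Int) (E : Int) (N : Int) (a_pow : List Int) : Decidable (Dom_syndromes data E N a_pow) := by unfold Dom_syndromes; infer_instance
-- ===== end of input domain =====

-- ===== PORT A =====
-- B replaces A's per-term modular exponentiation (power) with Horner evaluation: O(E*N) instead of O(E*N^2).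
-- Ports use pyGetD with default 0; Pre_ restricts to inputs where Python A indexes in range (it raises IndexError otherwise).

-- add(a,b) = (a+b)%929
def pvAdd (a b : Int) : Int := PySem.Int.mod (a + b) 929

-- multiply(a,b) = (a*b)%929
def pvMultiply (a b : Int) : Int := PySem.Int.mod (a * b) 929

-- power(a,x): n=a; if x==0: return 1; for i in range(x-1): n=multiply(n,a); return n
def pvPower (a x : Int) : Int :=
  if x = 0 then 1
  else (PySem.List.pyRange 0 (x - 1) 1).foldl (fun n _ => pvMultiply n a) a

def syndromes (data : List Int) (E : Int) (N : Int) (a_pow : List Int) : List Int :=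
  (PySem.List.pyRange 0 E 1).foldl
    (fun s i =>
      s.set i.toNat ((PySem.List.pyRange 0 N 1).foldl
        (fun n j =>
          pvAdd n (pvMultiply (PySem.List.pyGetD data j 0)
                              (pvPower (PySem.List.pyGetD a_pow (i + 1) 0) (N - 1 - j)))) 0))
    (List.replicate E.toNat 0)

-- ===== PORT B =====
def syndromes_alt (data : List Int) (E : Int) (N : Int) (a_pow : List Int) : List Int :=
  (PySem.List.pyRange 0 E 1).foldl
    (fun out i =>
      out ++ [(PySem.List.pyRange 0 N 1).foldl
        (fun acc j =>
          PySem.Int.mod (acc * PySem.List.pyGetD a_pow (i + 1) 0 + PySem.List.pyGetD data j 0) 929) 0])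
    []

-- ===== PRECONDITION & SPEC =====
-- Exactly where Python A returns: with E > 0 and N > 0 it reads data[0..N-1] and a_pow[1..E]; it raises IndexError otherwise.
def Pre_syndromes (data : List Int) (E : Int) (N : Int) (a_pow : List Int) : Prop :=
  E ≤ 0 ∨ N ≤ 0 ∨ (N ≤ (data.length : Int) ∧ E < (a_pow.length : Int))
instance (data : List Int) (E : Int) (N : Int) (a_pow : List Int) : Decidable (Pre_syndromes data E N a_pow) := by unfold Pre_syndromes; infer_instance

def pvWitness_syndromes : List Int × Int × Int × List Int := ([3, 100, 7], 2, 3, [1, 3, 9])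

def Spec_syndromes (data : List Int) (E : Int) (N : Int) (a_pow : List Int) (out : List Int) : Prop := out = syndromes_alt data E N a_pow
instance (data : List Int) (E : Int) (N : Int) (a_pow : List Int) (out : List Int) : Decidable (Spec_syndromes data E N a_pow out) := by unfold Spec_syndromes; infer_instance

-- ===== CLAIM (what is proved, stated in full; the proofs are below) =====
def Claim_equal_syndromes : Prop := ∀ (data : List Int) (E : Int) (N : Int) (a_pow : List Int), Dom_syndromes data E N a_pow → Pre_syndromes data E N a_pow → Spec_syndromes data E N a_pow (syndromes data E N a_pow)

-- ===== LEMMAS AND PROOFS =====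

theorem pvMod929 (x : Int) : PySem.Int.mod x 929 = x % 929 :=
  PySem.Int.mod_eq_emod_of_pos (by norm_num)

theorem emod_modeq (x : Int) : x % 929 ≡ x [ZMOD 929] :=
  Int.emod_emod_of_dvd x dvd_rfl

-- the fold inside pvPower
theorem pvPower_loop (a : Int) (l : List Int) : ∀ acc : Int,
    l.foldl (fun n _ => pvMultiply n a) acc ≡ acc * a ^ l.length [ZMOD 929] := by
  induction l with
  | nil => intro acc; simp
  | cons h t ih =>
    intro acc
    simp only [List.foldl_cons, List.length_cons]
    calc List.foldl (fun n _ => pvMultiply n a) (pvMultiply acc a) t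
        ≡ pvMultiply acc a * a ^ t.length [ZMOD 929] := ih _
      _ ≡ (acc * a) * a ^ t.length [ZMOD 929] := by
          exact Int.ModEq.mul_right _ (by rw [pvMultiply, pvMod929]; exact emod_modeq _)
      _ = acc * a ^ (t.length + 1) := by ring

theorem pvPower_modeq (a x : Int) (hx : 0 ≤ x) : pvPower a x ≡ a ^ x.toNat [ZMOD 929] := by
  by_cases h0 : x = 0
  · simp [pvPower, h0]
  · rw [pvPower, if_neg h0]
    have := pvPower_loop a (PySem.List.pyRange 0 (x - 1) 1) a
    rw [PySem.List.length_pyRange_one] at this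
    calc (PySem.List.pyRange 0 (x - 1) 1).foldl (fun n _ => pvMultiply n a) a
        ≡ a * a ^ (x - 1 - 0).toNat [ZMOD 929] := this
      _ = a ^ x.toNat := by
          rw [← pow_succ']
          congr 1
          omega

-- the target sum: sum over j in [m, N) of d j * a^(N-1-j)
def pvS (a : Int) (d : Int → Int) (N m : Int) : Int :=
  ((PySem.List.pyRange m N 1).map (fun j => d j * a ^ (N - 1 - j).toNat)).sum

-- A's inner loop, from index N-k to N
theorem innerA_modeq (a : Int) (d : Int → Int) (N : Int) : ∀ (k : Nat) (acc : Int),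
    (PySem.List.pyRange (N - k) N 1).foldl
        (fun n j => pvAdd n (pvMultiply (d j) (pvPower a (N - 1 - j)))) acc
      ≡ acc + pvS a d N (N - k) [ZMOD 929] := by
  intro k
  induction k with
  | zero => intro acc; simp [pvS]
  | succ k ih =>
    intro acc
    have hlt : N - ((k:Nat)+1:Nat) < N := by push_cast; omega
    rw [PySem.List.pyRange_one_cons hlt, List.foldl_cons]
    have hstep : N - ((k:Nat)+1:Nat) + 1 = N - (k:Nat) := by push_cast; omega
    rw [hstep]
    have hexp : N - 1 - (N - ((k:Nat)+1:Nat)) = (k : Int) := by push_cast; omega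
    calc (PySem.List.pyRange (N - (k:Nat)) N 1).foldl _
            (pvAdd acc (pvMultiply (d (N - ((k:Nat)+1:Nat))) (pvPower a (N - 1 - (N - ((k:Nat)+1:Nat))))))
        ≡ pvAdd acc (pvMultiply (d (N - ((k:Nat)+1:Nat))) (pvPower a (N - 1 - (N - ((k:Nat)+1:Nat)))))
            + pvS a d N (N - (k:Nat)) [ZMOD 929] := ih _
      _ ≡ (acc + d (N - ((k:Nat)+1:Nat)) * a ^ k) + pvS a d N (N - (k:Nat)) [ZMOD 929] := by
          apply Int.ModEq.add_right
          rw [pvAdd, pvMod929]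
          calc (acc + pvMultiply (d (N - ((k:Nat)+1:Nat))) (pvPower a (N - 1 - (N - ((k:Nat)+1:Nat))))) % 929
              ≡ acc + pvMultiply (d (N - ((k:Nat)+1:Nat))) (pvPower a (N - 1 - (N - ((k:Nat)+1:Nat)))) [ZMOD 929] := emod_modeq _
            _ ≡ acc + d (N - ((k:Nat)+1:Nat)) * pvPower a (N - 1 - (N - ((k:Nat)+1:Nat))) [ZMOD 929] := by
                apply Int.ModEq.add_left
                rw [pvMultiply, pvMod929]; exact emod_modeq _
            _ ≡ acc + d (N - ((k:Nat)+1:Nat)) * a ^ k [ZMOD 929] := by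
                apply Int.ModEq.add_left
                apply Int.ModEq.mul_left
                have := pvPower_modeq a (N - 1 - (N - ((k:Nat)+1:Nat))) (by omega)
                rw [hexp] at this ⊢
                simpa using this
      _ = acc + pvS a d N (N - ((k:Nat)+1:Nat)) := by
          unfold pvS
          rw [PySem.List.pyRange_one_cons hlt, List.map_cons, List.sum_cons, hstep, hexp]
          simp only [Int.toNat_natCast]
          push_cast
          ring

-- B's inner loop (Horner), from index N-k to N
theorem innerB_modeq (a : Int) (d : Int → Int) (N : Int) : ∀ (k : Nat) (acc : Int),
    (PySem.List.pyRange (N - k) N 1).foldl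
        (fun acc j => PySem.Int.mod (acc * a + d j) 929) acc
      ≡ acc * a ^ k + pvS a d N (N - k) [ZMOD 929] := by
  intro k
  induction k with
  | zero => intro acc; simp [pvS]
  | succ k ih =>
    intro acc
    have hlt : N - ((k:Nat)+1:Nat) < N := by push_cast; omega
    rw [PySem.List.pyRange_one_cons hlt, List.foldl_cons]
    have hstep : N - ((k:Nat)+1:Nat) + 1 = N - (k:Nat) := by push_cast; omega
    rw [hstep]
    have hexp : N - 1 - (N - ((k:Nat)+1:Nat)) = (k : Int) := by push_cast; omega
    calc (PySem.List.pyRange (N - (k:Nat)) N 1).foldl _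
            (PySem.Int.mod (acc * a + d (N - ((k:Nat)+1:Nat))) 929)
        ≡ (PySem.Int.mod (acc * a + d (N - ((k:Nat)+1:Nat))) 929) * a ^ k
            + pvS a d N (N - (k:Nat)) [ZMOD 929] := ih _
      _ ≡ (acc * a + d (N - ((k:Nat)+1:Nat))) * a ^ k + pvS a d N (N - (k:Nat)) [ZMOD 929] := by
          apply Int.ModEq.add_right
          apply Int.ModEq.mul_right
          rw [pvMod929]; exact emod_modeq _
      _ = acc * a ^ (k + 1) + pvS a d N (N - ((k:Nat)+1:Nat)) := by
          unfold pvS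
          rw [PySem.List.pyRange_one_cons hlt, List.map_cons, List.sum_cons, hstep, hexp]
          simp only [Int.toNat_natCast]
          push_cast
          ring

-- a fold whose step always ends in %929 yields a value fixed by %929 on a nonempty list
theorem foldl_mod_fixed (f : Int → Int → Int) (hf : ∀ x y, f x y % 929 = f x y) :
    ∀ (l : List Int) (x : Int), l ≠ [] → (l.foldl f x) % 929 = l.foldl f x := by
  intro l
  induction l with
  | nil => intro x h; exact absurd rfl h
  | cons h t ih =>
    intro x _
    cases t with
    | nil => simpa using hf x h
    | cons b u => exact ih (f x h) (by simp)

-- the two inner loops agree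
theorem inner_eq (a : Int) (d : Int → Int) (N : Int) :
    (PySem.List.pyRange 0 N 1).foldl
        (fun n j => pvAdd n (pvMultiply (d j) (pvPower a (N - 1 - j)))) 0
      = (PySem.List.pyRange 0 N 1).foldl
        (fun acc j => PySem.Int.mod (acc * a + d j) 929) 0 := by
  by_cases hN : N ≤ 0
  · rw [PySem.List.pyRange_one_eq_nil hN]
    rfl
  · replace hN : 0 < N := by omega
    have h0 : (0 : Int) = N - (N.toNat : Nat) := by omega
    have hne : PySem.List.pyRange 0 N 1 ≠ [] := by
      rw [PySem.List.pyRange_one_cons hN]; simp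
    have hA := innerA_modeq a d N N.toNat 0
    have hB := innerB_modeq a d N N.toNat 0
    rw [← h0] at hA hB
    have hAf := foldl_mod_fixed (fun n j => pvAdd n (pvMultiply (d j) (pvPower a (N - 1 - j))))
      (fun x y => by simp only [pvAdd, pvMod929]; exact Int.emod_emod_of_dvd _ dvd_rfl) _ (0:Int) hne
    have hBf := foldl_mod_fixed (fun acc j => PySem.Int.mod (acc * a + d j) 929)
      (fun x y => by simp only [pvMod929]; exact Int.emod_emod_of_dvd _ dvd_rfl) _ (0:Int) hne
    have : (0 + pvS a d N 0) % 929 = (0 * a ^ N.toNat + pvS a d N 0) % 929 := by ring_nf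
    unfold Int.ModEq at hA hB
    rw [← hAf, ← hBf, hA, hB, this]

-- the set-into-replicate outer loop only touches indices < the prefix length
theorem foldl_set_append (f : Int → Int) (l : List Int) : ∀ (s t : List Int),
    (∀ i ∈ l, 0 ≤ i ∧ i.toNat < s.length) →
    l.foldl (fun acc i => acc.set i.toNat (f i)) (s ++ t)
      = (l.foldl (fun acc i => acc.set i.toNat (f i)) s) ++ t := by
  induction l with
  | nil => intro s t _; rfl
  | cons h l ih =>
    intro s t hb
    simp only [List.foldl_cons]
    rw [List.set_append, if_pos (hb h (by simp)).2]
    exact ih _ _ (fun i hi => by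
      have := hb i (by simp [hi]); simpa using this)

-- A's outer loop produces the map of the inner results
theorem outerA_eq_map (f : Int → Int) : ∀ (n : Nat),
    (PySem.List.pyRange 0 (n : Int) 1).foldl (fun s i => s.set i.toNat (f i)) (List.replicate n 0)
      = (PySem.List.pyRange 0 (n : Int) 1).map f := by
  intro n
  induction n with
  | zero => simp [PySem.List.pyRange_one_eq_nil (by omega : (0:Int) ≤ 0)]
  | succ n ih =>
    have hcast : ((n + 1 : Nat) : Int) = (n : Int) + 1 := by push_cast; ring
    rw [hcast, PySem.List.pyRange_one_succ_right (by positivity), List.foldl_append,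
        List.map_append]
    have hrep : List.replicate (n + 1) (0 : Int) = List.replicate n 0 ++ [0] := by
      simp [List.replicate_succ']
    rw [hrep, foldl_set_append f _ _ _ (fun i hi => by
      rw [PySem.List.mem_pyRange_one] at hi
      constructor
      · exact hi.1
      · simp only [List.length_replicate]; omega), ih]
    simp only [List.foldl_cons, List.foldl_nil, List.map_cons, List.map_nil]
    rw [List.set_append, if_neg (by simp)]
    simp

-- ===== VERDICT (by name: the statement is the Claim_ definition above) =====
theorem syndromes_spec : Claim_equal_syndromes := by
  intro data E N a_pow _ _
  unfold Spec_syndromes syndromes syndromes_alt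
  rw [PySem.List.foldl_append_singleton_eq_map, List.nil_append]
  by_cases hE : E ≤ 0
  · rw [PySem.List.pyRange_one_eq_nil hE]
    simp [show E.toNat = 0 by omega]
  · have hcast : E = ((E.toNat : Nat) : Int) := by omega
    rw [hcast]
    simp only [Int.toNat_natCast]
    rw [outerA_eq_map (fun i =>
      (PySem.List.pyRange 0 N 1).foldl
        (fun n j => pvAdd n (pvMultiply (PySem.List.pyGetD data j 0)
          (pvPower (PySem.List.pyGetD a_pow (i + 1) 0) (N - 1 - j)))) 0) E.toNat]
    exact List.map_congr_left (fun i _ =>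
      inner_eq (PySem.List.pyGetD a_pow (i + 1) 0) (fun j => PySem.List.pyGetD data j 0) N)
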